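-- pv_equiv track=rewrite | github.com/dpriskorn/entitybase-backend | tests/unit/rdf/test_split_blocks.py | split_subject_blocks
-- ===== SOURCE A (Python) =====
-- def split_subject_blocks(ttl: str) -> dict[str, str]:
--     blocks = {}
--     current_subject = None
--     current_lines = []
--
--     for line in ttl.splitlines():
--         if not line.strip():
--             continue
--
--         line_stripped = line.strip()
--         if line_stripped.lower().startswith("@prefix"):
--             continue
--
--         if line_stripped.startswith("<http") or line_stripped.startswith("<https"):
--             continue
--
--         if line and not line.startswith((" ", "\t")):
--             if current_subject:
--                 blocks[current_subject] = "\n".join(current_lines).strip()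
--             current_subject = list(line.split())[0]
--             current_lines = [line]
--         else:
--             current_lines.append(line)
--
--     if current_subject:
--         blocks[current_subject] = "\n".join(current_lines).strip()
--
--     return blocks
-- ===== SOURCE B (Python) =====
-- def split_subject_blocks(ttl: str) -> dict[str, str]:
--     def keep(line):
--         s = line.strip()
--         return bool(s) and not s.lower().startswith("@prefix") and not s.startswith("<http")
--
--     def indented(line):
--         return line.startswith((" ", "\t"))
--
--     lines = [l for l in ttl.splitlines() if keep(l)]
--     n = len(lines)
--     segments = []
--     i = 0
--     while i < n:
--         if indented(lines[i]):
--             i += 1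
--             continue
--         j = i + 1
--         while j < n and indented(lines[j]):
--             j += 1
--         segments.append(lines[i:j])
--         i = j
--     return {seg[0].split()[0]: "\n".join(seg).strip() for seg in segments}
-- ===== Notes on version B (the rewrite author's own statement) =====
-- stated objective: alternative
-- what changed: B replaces A's streaming state machine (current_subject/current_lines with inline skips and flushes) by staged passes: a filter pass applying the three skip rules, a segmentation pass that cuts the survivors into an explicit list of indentation-delimited segments, and a dict comprehension keying each segment by its head line's first word.
import Mathlib
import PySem

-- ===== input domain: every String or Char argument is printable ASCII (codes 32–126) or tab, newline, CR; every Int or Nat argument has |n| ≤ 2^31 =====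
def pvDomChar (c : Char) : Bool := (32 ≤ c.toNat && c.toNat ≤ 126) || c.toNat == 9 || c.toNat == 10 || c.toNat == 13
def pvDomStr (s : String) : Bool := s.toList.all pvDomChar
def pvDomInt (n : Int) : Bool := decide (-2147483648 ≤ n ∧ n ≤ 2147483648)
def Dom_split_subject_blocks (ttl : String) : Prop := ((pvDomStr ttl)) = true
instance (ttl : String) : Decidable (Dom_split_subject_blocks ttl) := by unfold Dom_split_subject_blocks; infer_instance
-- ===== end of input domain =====

-- B: staged passes — filter (the three skip rules), segmentation into an explicit list of
-- indentation-delimited segments, then a dict built per segment; alternative decomposition, same cost.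


-- ===== PORT A =====
-- one loop iteration of A: state = (blocks, current_subject, current_lines)
def pvA_step (st : PySem.Dict String String × Option String × List String) (line : String) :
    PySem.Dict String String × Option String × List String :=
  let (blocks, cs, cl) := st
  if PySem.Str.strip line = "" then st
  else
    let ls := PySem.Str.strip line
    if PySem.Str.startswith (PySem.Str.lower ls) "@prefix" then st
    else if PySem.Str.startswith ls "<http" || PySem.Str.startswith ls "<https" then st
    else if line ≠ "" ∧ ¬ (PySem.Str.startswith line " " || PySem.Str.startswith line "\t") then
      -- if current_subject: flush ('' and None are both falsy)
      let blocks' : PySem.Dict String String :=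
        match cs with
        | some s => if s = "" then blocks
                    else blocks.insert s (PySem.Str.strip (PySem.Str.join "\n" cl))
        | none => blocks
      (blocks', some ((PySem.Str.split₀ line).headD ""), [line])
    else (blocks, cs, cl ++ [line])

def split_subject_blocks (ttl : String) : List (String × String) :=
  let st := (PySem.Str.splitlines ttl).foldl pvA_step (PySem.Dict.empty, none, [])
  let blocks :=
    match st.2.1 with
    | some s => if s = "" then st.1
                else st.1.insert s (PySem.Str.strip (PySem.Str.join "\n" st.2.2))
    | none => st.1
  blocks.items

-- ===== PORT B =====
def pvB_keep (line : String) : Bool :=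
  let s := PySem.Str.strip line
  !(s == "") && !(PySem.Str.startswith (PySem.Str.lower s) "@prefix")
    && !(PySem.Str.startswith s "<http")

def pvB_indent (line : String) : Bool :=
  PySem.Str.startswith line " " || PySem.Str.startswith line "\t"

-- Source B's segmentation loop: the outer while advances over the list (skipping a leading
-- indented line), the inner 'j' scan over consecutive indented lines is takeWhile/dropWhile
def pvB_chunks : List String → List (List String)
  | [] => []
  | l :: rest =>
    if pvB_indent l then pvB_chunks rest
    else (l :: rest.takeWhile pvB_indent) :: pvB_chunks (rest.dropWhile pvB_indent)
termination_by ls => ls.length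
decreasing_by
  · simp
  · have := List.length_dropWhile_le pvB_indent rest
    simp
    omega

-- one entry of Source B's dict comprehension; seg is nonempty by construction of pvB_chunks,
-- so headD "" is seg[0]
def pvB_segStep (d : PySem.Dict String String) (seg : List String) : PySem.Dict String String :=
  d.insert ((PySem.Str.split₀ (seg.headD "")).headD "")
           (PySem.Str.strip (PySem.Str.join "\n" seg))

def split_subject_blocks_alt (ttl : String) : List (String × String) :=
  ((pvB_chunks ((PySem.Str.splitlines ttl).filter pvB_keep)).foldl pvB_segStep
    PySem.Dict.empty).items

-- ===== PRECONDITION & SPEC =====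
def Spec_split_subject_blocks (ttl : String) (out : List (String × String)) : Prop := out = split_subject_blocks_alt ttl
instance (ttl : String) (out : List (String × String)) : Decidable (Spec_split_subject_blocks ttl out) := by unfold Spec_split_subject_blocks; infer_instance

-- ===== CLAIM (what is proved, stated in full; the proofs are below) =====
def Claim_equal_split_subject_blocks : Prop := ∀ (ttl : String), Dom_split_subject_blocks ttl → Spec_split_subject_blocks ttl (split_subject_blocks ttl)

-- ===== LEMMAS AND PROOFS =====

-- proof-side intermediate: a streaming grouping of the filtered lines (subject, pending lines);
-- it bridges A's fold (main_inv) and B's chunk fold (group_none)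
def pvB_flush (blocks : PySem.Dict String String) (subj : Option String) (lines : List String) :
    PySem.Dict String String :=
  match subj with
  | some s => blocks.insert s (PySem.Str.strip (PySem.Str.join "\n" lines))
  | none => blocks

def pvB_group : List String → PySem.Dict String String → Option String → List String →
    PySem.Dict String String
  | [], blocks, subj, lines => pvB_flush blocks subj lines
  | line :: rest, blocks, subj, lines =>
    if pvB_indent line then
      match subj with
      | some _ => pvB_group rest blocks subj (lines ++ [line])
      | none => pvB_group rest blocks subj lines
    else
      pvB_group rest (pvB_flush blocks subj lines) (some ((PySem.Str.split₀ line).headD "")) [line]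

-- a kept line has a non-space character
lemma keep_strip_ne (line : String) (h : pvB_keep line = true) : PySem.Str.strip line ≠ "" := by
  unfold pvB_keep at h
  simp only [Bool.and_eq_true, Bool.not_eq_true', beq_eq_false_iff_ne, ne_eq] at h
  exact h.1.1

-- every word produced by Chars.split₀.go is nonempty (given nonempty accumulator entries)
lemma go_elems_ne_nil : ∀ (s cur : List Char) (acc : List (List Char)),
    (∀ a ∈ acc, a ≠ []) → ∀ x ∈ PySem.Chars.split₀.go s cur acc, x ≠ [] := by
  intro s
  induction s with
  | nil =>
    intro cur acc hacc x hx
    simp only [PySem.Chars.split₀.go] at hx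
    split at hx
    · exact hacc x (List.mem_reverse.mp hx)
    · rename_i hcur
      rcases List.mem_cons.mp (List.mem_reverse.mp hx) with h | h
      · subst h
        have hcne : cur ≠ [] := by simpa [List.isEmpty_iff] using hcur
        simpa using hcne
      · exact hacc x h
  | cons c rest ih =>
    intro cur acc hacc x hx
    simp only [PySem.Chars.split₀.go] at hx
    split at hx
    · split at hx
      · exact ih [] acc hacc x hx
      · rename_i hcur
        refine ih [] (cur.reverse :: acc) ?_ x hx
        intro a ha
        rcases List.mem_cons.mp ha with h | h
        · subst h
          have hcne : cur ≠ [] := by simpa [List.isEmpty_iff] using hcur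
          simpa using hcne
        · exact hacc a h
    · exact ih (c :: cur) acc hacc x hx

-- go returns a nonempty list when there is something to emit
lemma go_ne_nil : ∀ (s cur : List Char) (acc : List (List Char)),
    (acc ≠ [] ∨ cur ≠ [] ∨ ∃ c ∈ s, PySem.Chars.isspace c = false) →
    PySem.Chars.split₀.go s cur acc ≠ [] := by
  intro s
  induction s with
  | nil =>
    intro cur acc h
    simp only [PySem.Chars.split₀.go]
    split
    · rename_i hcur
      rcases h with h | h | h
      · simpa using h
      · exact absurd (List.isEmpty_iff.mp hcur) h
      · simp at h
    · simp
  | cons c rest ih =>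
    intro cur acc h
    simp only [PySem.Chars.split₀.go]
    split
    · rename_i hsp
      split
      · rename_i hcur
        refine ih [] acc ?_
        rcases h with h | h | h
        · exact Or.inl h
        · exact absurd (List.isEmpty_iff.mp hcur) h
        · rcases h with ⟨d, hd, hds⟩
          rcases List.mem_cons.mp hd with h | h
          · subst h; rw [hsp] at hds; cases hds
          · exact Or.inr (Or.inr ⟨d, h, hds⟩)
      · exact ih [] (cur.reverse :: acc) (Or.inl (by simp))
    · exact ih (c :: cur) acc (Or.inr (Or.inl (by simp)))

lemma strip_ne_nonspace (l : List Char) (h : PySem.Chars.strip l ≠ []) :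
    ∃ c ∈ l, PySem.Chars.isspace c = false := by
  by_contra hc
  push Not at hc
  apply h
  have hl : PySem.Chars.lstrip l = [] := by
    unfold PySem.Chars.lstrip
    rw [List.dropWhile_eq_nil_iff]
    intro x hx
    have := hc x hx
    simp_all
  unfold PySem.Chars.strip
  rw [hl]
  rfl

-- the first word of a kept line is a nonempty string
lemma keep_head_ne (line : String) (h : pvB_keep line = true) :
    (PySem.Str.split₀ line).headD "" ≠ "" := by
  have hs : PySem.Chars.strip line.toList ≠ [] := by
    intro hc
    apply keep_strip_ne line h
    unfold PySem.Str.strip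
    rw [hc]
  have hne : PySem.Chars.split₀ line.toList ≠ [] := by
    unfold PySem.Chars.split₀
    exact go_ne_nil _ [] [] (Or.inr (Or.inr (strip_ne_nonspace _ hs)))
  have hmap := PySem.Str.split₀_map_toList line
  cases hw : PySem.Str.split₀ line with
  | nil => rw [hw] at hmap; exact absurd hmap.symm hne
  | cons w ws =>
    rw [hw] at hmap
    have hwmem : w.toList ∈ PySem.Chars.split₀ line.toList := by
      rw [← hmap]; simp
    have hwne : w.toList ≠ [] := by
      unfold PySem.Chars.split₀ at hwmem
      exact go_elems_ne_nil _ [] [] (by simp) _ hwmem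
    simp only [List.headD_cons]
    intro hc; subst hc; exact hwne rfl

-- a dropped line is a fixed point of A's step
lemma step_skip (st : PySem.Dict String String × Option String × List String) (line : String)
    (h : pvB_keep line = false) : pvA_step st line = st := by
  obtain ⟨blocks, cs, cl⟩ := st
  simp only [pvB_keep, Bool.and_eq_false_iff, Bool.not_eq_false', beq_iff_eq] at h
  simp only [pvA_step]
  by_cases h1 : PySem.Str.strip line = ""
  · rw [if_pos h1]
  · rw [if_neg h1]
    rcases h with (h | h) | h
    · exact absurd h h1
    · rw [if_pos h]
    · by_cases hpre : PySem.Str.startswith (PySem.Str.lower (PySem.Str.strip line)) "@prefix" = true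
      · rw [if_pos hpre]
      · rw [if_neg hpre, if_pos (show (PySem.Str.startswith (PySem.Str.strip line) "<http"
          || PySem.Str.startswith (PySem.Str.strip line) "<https") = true by rw [h]; simp)]

-- A's step on a kept line, subject-line case
lemma step_keep_subj (blocks : PySem.Dict String String) (cs : Option String) (cl : List String)
    (line : String) (hk : pvB_keep line = true) (hns : pvB_indent line = false) :
    pvA_step (blocks, cs, cl) line =
      ((match cs with
        | some s => if s = "" then blocks
                    else blocks.insert s (PySem.Str.strip (PySem.Str.join "\n" cl))
        | none => blocks),
       some ((PySem.Str.split₀ line).headD ""), [line]) := by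
  unfold pvB_keep at hk
  simp only [Bool.and_eq_true, Bool.not_eq_true', beq_eq_false_iff_ne, ne_eq] at hk
  obtain ⟨⟨h1, h2⟩, h3⟩ := hk
  have hline : line ≠ "" := by
    intro hc; subst hc; exact h1 rfl
  have h2' : PySem.Str.startswith (PySem.Str.strip line) "<https" = false := by
    by_contra hx
    simp only [Bool.not_eq_false] at hx
    have hx' : PySem.Str.startswith (PySem.Str.strip line) "<http" = true := by
      simp only [PySem.Str.startswith] at hx ⊢
      rw [PySem.Chars.startswith_iff] at hx ⊢
      exact List.IsPrefix.trans (by decide) hx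
    rw [h3] at hx'
    cases hx'
  have hA : ¬ PySem.Str.startswith (PySem.Str.lower (PySem.Str.strip line)) "@prefix" = true := by
    simp only [h2]; decide
  have hB : ¬ ((PySem.Str.startswith (PySem.Str.strip line) "<http"
      || PySem.Str.startswith (PySem.Str.strip line) "<https") = true) := by
    simp only [h3, h2']; decide
  have hC : line ≠ "" ∧ ¬ ((PySem.Str.startswith line " "
      || PySem.Str.startswith line "\t") = true) := by
    refine ⟨hline, ?_⟩
    unfold pvB_indent at hns
    simp only [hns]
    decide
  simp only [pvA_step]
  rw [if_neg h1, if_neg hA, if_neg hB, if_pos hC]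

-- A's step on a kept indented line
lemma step_keep_indent (blocks : PySem.Dict String String) (cs : Option String) (cl : List String)
    (line : String) (hk : pvB_keep line = true) (hns : pvB_indent line = true) :
    pvA_step (blocks, cs, cl) line = (blocks, cs, cl ++ [line]) := by
  unfold pvB_keep at hk
  simp only [Bool.and_eq_true, Bool.not_eq_true', beq_eq_false_iff_ne, ne_eq] at hk
  obtain ⟨⟨h1, h2⟩, h3⟩ := hk
  have h2' : PySem.Str.startswith (PySem.Str.strip line) "<https" = false := by
    by_contra hx
    simp only [Bool.not_eq_false] at hx
    have hx' : PySem.Str.startswith (PySem.Str.strip line) "<http" = true := by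
      simp only [PySem.Str.startswith] at hx ⊢
      rw [PySem.Chars.startswith_iff] at hx ⊢
      exact List.IsPrefix.trans (by decide) hx
    rw [h3] at hx'
    cases hx'
  have hA : ¬ PySem.Str.startswith (PySem.Str.lower (PySem.Str.strip line)) "@prefix" = true := by
    simp only [h2]; decide
  have hB : ¬ ((PySem.Str.startswith (PySem.Str.strip line) "<http"
      || PySem.Str.startswith (PySem.Str.strip line) "<https") = true) := by
    simp only [h3, h2']; decide
  have hC : ¬ (line ≠ "" ∧ ¬ ((PySem.Str.startswith line " "
      || PySem.Str.startswith line "\t") = true)) := by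
    intro ⟨_, hc⟩
    unfold pvB_indent at hns
    exact hc hns
  simp only [pvA_step]
  rw [if_neg h1, if_neg hA, if_neg hB, if_neg hC]

-- final flush applied to A's fold state
def pvA_final (st : PySem.Dict String String × Option String × List String) :
    PySem.Dict String String :=
  match st.2.1 with
  | some s => if s = "" then st.1
              else st.1.insert s (PySem.Str.strip (PySem.Str.join "\n" st.2.2))
  | none => st.1

-- the main invariant: A's fold+flush equals the streaming grouping of the filtered survivors;
-- when no subject is current, A's accumulated orphan lines are irrelevant.
lemma main_inv : ∀ (ls : List String) (blocks : PySem.Dict String String)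
    (cs : Option String) (cl : List String),
    (∀ s, cs = some s → s ≠ "") →
    pvA_final (ls.foldl pvA_step (blocks, cs, cl)) =
      pvB_group (ls.filter pvB_keep) blocks cs
        (match cs with | none => [] | some _ => cl) := by
  intro ls
  induction ls with
  | nil =>
    intro blocks cs cl hcs
    cases cs with
    | none => rfl
    | some s =>
      simp only [List.foldl_nil, List.filter_nil, pvA_final, pvB_group, pvB_flush]
      rw [if_neg (hcs s rfl)]
  | cons line rest ih =>
    intro blocks cs cl hcs
    by_cases hk : pvB_keep line = true
    · rw [List.filter_cons_of_pos hk]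
      by_cases hns : pvB_indent line = true
      · rw [List.foldl_cons, step_keep_indent blocks cs cl line hk hns]
        rw [ih _ _ _ hcs]
        simp only [pvB_group, if_pos hns]
        cases cs with
        | none => rfl
        | some s => rfl
      · rw [List.foldl_cons,
          step_keep_subj blocks cs cl line hk (by simpa using hns)]
        rw [ih _ _ _ (fun s hs => by
          injection hs with hs; rw [← hs]; exact keep_head_ne line hk)]
        simp only [pvB_group, if_neg hns, pvB_flush]
        cases cs with
        | none => rfl
        | some s => simp [hcs s rfl]
    · rw [List.filter_cons_of_neg hk, List.foldl_cons,
        step_skip _ line (by simpa using hk)]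
      exact ih blocks cs cl hcs

-- skipping leading indented lines does not change the segmentation
lemma chunks_dropWhile : ∀ ls : List String,
    pvB_chunks (ls.dropWhile pvB_indent) = pvB_chunks ls := by
  intro ls
  induction ls with
  | nil => rfl
  | cons l rest ih =>
    by_cases h : pvB_indent l = true
    · rw [List.dropWhile_cons_of_pos h, ih]
      rw [pvB_chunks, if_pos h]
    · rw [List.dropWhile_cons_of_neg h]

-- streaming grouping with an open subject = chunk fold after closing the pending segment
lemma group_some : ∀ (ls : List String) (d : PySem.Dict String String) (s : String)
    (cur : List String),
    pvB_group ls d (some s) cur =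
      (pvB_chunks ls).foldl pvB_segStep
        (d.insert s (PySem.Str.strip (PySem.Str.join "\n" (cur ++ ls.takeWhile pvB_indent)))) := by
  intro ls
  induction ls with
  | nil =>
    intro d s cur
    simp [pvB_group, pvB_flush, pvB_chunks]
  | cons l rest ih =>
    intro d s cur
    by_cases h : pvB_indent l = true
    · rw [pvB_group, if_pos h]
      rw [ih]
      rw [pvB_chunks, if_pos h, List.takeWhile_cons_of_pos h]
      simp
    · rw [pvB_group, if_neg h]
      rw [ih]
      rw [pvB_chunks, if_neg h, List.takeWhile_cons_of_neg h]
      rw [List.foldl_cons, chunks_dropWhile]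
      simp [pvB_flush, pvB_segStep]

-- streaming grouping with no open subject = chunk fold
lemma group_none : ∀ (ls : List String) (d : PySem.Dict String String),
    pvB_group ls d none [] = (pvB_chunks ls).foldl pvB_segStep d := by
  intro ls
  induction ls with
  | nil => intro d; simp [pvB_group, pvB_flush, pvB_chunks]
  | cons l rest ih =>
    intro d
    by_cases h : pvB_indent l = true
    · rw [pvB_group, if_pos h, ih, pvB_chunks, if_pos h]
    · rw [pvB_group, if_neg h, group_some, pvB_chunks, if_neg h,
        List.foldl_cons, chunks_dropWhile]
      simp [pvB_flush, pvB_segStep]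

-- ===== VERDICT (by name: the statement is the Claim_ definition above) =====
theorem split_subject_blocks_spec : Claim_equal_split_subject_blocks := by
  intro ttl _
  unfold Spec_split_subject_blocks split_subject_blocks split_subject_blocks_alt
  have h := main_inv (PySem.Str.splitlines ttl) PySem.Dict.empty none [] (by simp)
  simp only [pvA_final] at h
  rw [← group_none, ← h]
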